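-- pv_equiv track=rewrite | github.com/mash-97/MineField | codeforces/div-4-1703/b.py | using_v2
-- ===== SOURCE A (Python) =====
-- def using_v2(n, s):
--   chars_dict = dict()
--   for c in s:
--     if c in chars_dict:
--       chars_dict[c]+=1
--     else:
--       chars_dict[c]=2
--   return sum(chars_dict.values())
-- ===== SOURCE B (Python) =====
-- def using_v2(n, s):
--   # each distinct char contributes count+1, so the sum is len(s) + number of distinct chars
--   return len(s) + len(set(s))
-- ===== Notes on version B (the rewrite author's own statement) =====
-- stated objective: simpler
-- what changed: Replaced the per-character dict-counting loop (count+1 per char, seeded at 2) by the closed form len(s) + len(set(s)), since each distinct character contributes its count plus one.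
import Mathlib
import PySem

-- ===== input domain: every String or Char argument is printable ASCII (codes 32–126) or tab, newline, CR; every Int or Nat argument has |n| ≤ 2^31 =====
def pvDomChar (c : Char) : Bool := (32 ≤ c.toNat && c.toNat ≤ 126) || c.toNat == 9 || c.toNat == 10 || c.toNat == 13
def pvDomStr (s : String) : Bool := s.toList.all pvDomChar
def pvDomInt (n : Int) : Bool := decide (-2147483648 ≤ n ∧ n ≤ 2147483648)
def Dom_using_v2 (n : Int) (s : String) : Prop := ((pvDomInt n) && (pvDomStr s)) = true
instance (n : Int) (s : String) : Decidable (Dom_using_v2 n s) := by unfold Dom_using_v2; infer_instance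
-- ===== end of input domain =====

-- B replaces A's per-character dict-counting loop by the closed form len(s) + len(set(s)); objective: simpler.


-- ===== PORT A =====
def using_v2 (n : Int) (s : String) : Int :=
  let chars_dict : PySem.Dict Char Int :=
    s.toList.foldl
      (fun d c => if d.contains c then d.insert c (d.getD c 0 + 1) else d.insert c 2)
      PySem.Dict.empty
  chars_dict.values.sum

-- ===== PORT B =====
def using_v2_alt (n : Int) (s : String) : Int :=
  PySem.Str.len s + PySem.Set.len (PySem.Set.ofList s.toList)

-- ===== PRECONDITION & SPEC =====
def Spec_using_v2 (n : Int) (s : String) (out : Int) : Prop := out = using_v2_alt n s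
instance (n : Int) (s : String) (out : Int) : Decidable (Spec_using_v2 n s out) := by unfold Spec_using_v2; infer_instance

-- ===== CLAIM (what is proved, stated in full; the proofs are below) =====
def Claim_equal_using_v2 : Prop := ∀ (n : Int) (s : String), Dom_using_v2 n s → Spec_using_v2 n s (using_v2 n s)

-- ===== LEMMAS AND PROOFS =====

-- A's loop body written as a single insert of a computed value (the same function).
theorem pv_step_eq :
    (fun (d : PySem.Dict Char Int) (c : Char) =>
      if d.contains c then d.insert c (d.getD c 0 + 1) else d.insert c 2)
    = fun d c => d.insert c (if d.contains c then d.getD c 0 + 1 else 2) := by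
  funext d c
  split_ifs <;> rfl

-- Lookup in the loop's result: what d had, plus the processed count, plus 1 for a key new to d.
theorem pv_getD_fold (l : List Char) (c : Char) :
    ∀ (d : PySem.Dict Char Int),
    (l.foldl (fun d c => if d.contains c then d.insert c (d.getD c 0 + 1) else d.insert c 2) d).getD c 0
      = d.getD c 0 + l.count c + (if c ∈ l ∧ d.contains c = false then 1 else 0) := by
  induction l with
  | nil => intro d; simp
  | cons x l ih =>
    intro d
    simp only [List.foldl_cons]
    rw [ih]
    by_cases hx : c = x
    · subst hx
      by_cases hc : d.contains c = true
      · rw [if_pos hc, PySem.Dict.getD_insert_self]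
        rw [PySem.Dict.contains_insert_self]
        simp [hc, List.count_cons]
        omega
      · have hc' : d.contains c = false := by simpa using hc
        rw [if_neg hc, PySem.Dict.getD_insert_self]
        rw [PySem.Dict.contains_insert_self]
        rw [PySem.Dict.getD_of_not_contains d 0 hc']
        simp [hc', List.count_cons]
        omega
    · have hne : c ≠ x := hx
      have hgd : (if d.contains x = true then d.insert x (d.getD x 0 + 1) else d.insert x 2).getD c 0
          = d.getD c 0 := by
        split_ifs <;> exact PySem.Dict.getD_insert_of_ne d _ 0 hne
      have hct : (if d.contains x = true then d.insert x (d.getD x 0 + 1) else d.insert x 2).contains c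
          = d.contains c := by
        split_ifs <;> rw [PySem.Dict.contains_insert] <;> simp [hne]
      rw [hgd, hct]
      simp [List.count_cons, hne, List.mem_cons]
      exact fun e => hne e.symm

-- Over a nodup list S, the indicator of one member sums to 1.
theorem pv_sum_indicator (S : List Char) (c : Char) (hnd : S.Nodup) (hc : c ∈ S) :
    (S.map (fun k => (if k = c then (1 : Int) else 0))).sum = 1 := by
  induction S with
  | nil => simp at hc
  | cons y S ih =>
    rcases List.mem_cons.mp hc with h | h
    · subst h
      have hy : c ∉ S := (List.nodup_cons.mp hnd).1
      have hz : (S.map (fun k => (if k = c then (1 : Int) else 0))).sum = 0 := by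
        apply List.sum_eq_zero
        intro x hx
        simp only [List.mem_map] at hx
        obtain ⟨k, hk, rfl⟩ := hx
        simp [show k ≠ c from fun h => hy (h ▸ hk)]
      simp [hz]
    · have hy : y ≠ c := fun e => (List.nodup_cons.mp hnd).1 (e ▸ h)
      simp [hy, ih (List.nodup_cons.mp hnd).2 h]

-- Σ over a nodup list S containing every element of l of the counts of l = length of l.
theorem pv_sum_counts (S : List Char) (hnd : S.Nodup) :
    ∀ (l : List Char), (∀ x ∈ l, x ∈ S) →
      (S.map (fun k => (l.count k : Int))).sum = (l.length : Int) := by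
  intro l
  induction l with
  | nil => simp
  | cons c l ih =>
    intro hsub
    have hc : c ∈ S := hsub c (List.mem_cons_self ..)
    have hl : ∀ x ∈ l, x ∈ S := fun x hx => hsub x (List.mem_cons_of_mem _ hx)
    have hsplit : (S.map (fun k => (((c :: l).count k : Nat) : Int))).sum
        = (S.map (fun k => ((l.count k : Nat) : Int)
            + (if k = c then (1 : Int) else 0))).sum := by
      congr 1
      apply List.map_congr_left
      intro k _
      by_cases h : k = c
      · subst h
        simp [List.count_cons]
      · simp [List.count_cons, h]
        exact fun e => h e.symm
    rw [hsplit, List.sum_map_add, ih hl, pv_sum_indicator S c hnd hc]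
    push_cast [List.length_cons]
    ring

-- ===== VERDICT (by name: the statement is the Claim_ definition above) =====
theorem using_v2_spec : Claim_equal_using_v2 := by
  intro n s _
  unfold Spec_using_v2
  simp only [using_v2, using_v2_alt]
  set l := s.toList with hl
  set D : PySem.Dict Char Int :=
    l.foldl (fun d c => if d.contains c then d.insert c (d.getD c 0 + 1) else d.insert c 2)
      PySem.Dict.empty with hD
  have hins : D = l.foldl
      (fun d c => d.insert c (if d.contains c then d.getD c 0 + 1 else 2)) PySem.Dict.empty := by
    rw [hD, pv_step_eq]
  have hknd : D.keys.Nodup := by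
    rw [hins]
    exact PySem.Dict.nodup_keys_foldl_insert l _ _ PySem.Dict.nodup_keys_empty
  have hkeys : D.keys = PySem.Set.ofList l := by
    rw [hins, PySem.Dict.keys_foldl_insert, PySem.Dict.keys_empty,
      PySem.Set.ofList_eq_foldl]
    rfl
  have hvals : D.values = (PySem.Set.ofList l).map (fun k => D.getD k 0) := by
    rw [PySem.Dict.values_eq_map_keys D hknd 0, hkeys]
  have hmap : (PySem.Set.ofList l).map (fun k => D.getD k 0)
      = (PySem.Set.ofList l).map (fun k => ((l.count k : Nat) : Int) + 1) := by
    apply List.map_congr_left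
    intro k hk
    have hkl : k ∈ l := (PySem.Set.mem_ofList l k).mp hk
    rw [hD, pv_getD_fold]
    simp [PySem.Dict.getD_empty, PySem.Dict.contains_empty, hkl]
  have hone : ((PySem.Set.ofList l).map (fun _ => (1 : Int))).sum
      = ((PySem.Set.ofList l).length : Int) := by
    simp [List.map_const]
  rw [hvals, hmap, List.sum_map_add, hone,
    pv_sum_counts (PySem.Set.ofList l) (PySem.Set.nodup_ofList l) l
      (fun x hx => (PySem.Set.mem_ofList l x).mpr hx),
    PySem.Str.len_eq]
  simp [PySem.Set.len, hl]
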